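-- pv_equiv track=rewrite | github.com/Prajanya-g/videoSumarizer | backend/ranker_llm.py | _is_repetitive_content
-- ===== SOURCE A (Python) =====
-- def _is_repetitive_content(text: str) -> bool:
--     """Check if text contains repetitive patterns."""
--     words = text.lower().split()
--     if len(words) < 5:
--         return False
--
--     # Check for repeated phrases
--     word_counts = {}
--     for word in words:
--         word_counts[word] = word_counts.get(word, 0) + 1
--
--     # If any word appears more than 30% of the time, it's repetitive
--     max_frequency = max(word_counts.values()) / len(words)
--     return max_frequency > 0.3
-- ===== SOURCE B (Python) =====
-- def _is_repetitive_content(text: str) -> bool: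
--     """Check if text contains repetitive patterns (sort-and-scan re-implementation)."""
--     words = text.lower().split()
--     if len(words) < 5:
--         return False
--
--     # Sort the words so equal words form consecutive runs, then scan once,
--     # tracking the length of the current run and the longest run seen.
--     max_run = 0
--     run = 0
--     prev = None
--     for w in sorted(words):
--         if w == prev:
--             run += 1
--         else:
--             run = 1
--             prev = w
--         if run > max_run:
--             max_run = run
--
--     return max_run / len(words) > 0.3
-- ===== Notes on version B (the rewrite author's own statement) =====
-- stated objective: alternative
-- what changed: Replaces the hash-map word counter with sort-then-scan: the word list is sorted so equal words become consecutive runs, and one linear pass tracks the longest run, which is the maximum word frequency.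
import Mathlib
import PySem

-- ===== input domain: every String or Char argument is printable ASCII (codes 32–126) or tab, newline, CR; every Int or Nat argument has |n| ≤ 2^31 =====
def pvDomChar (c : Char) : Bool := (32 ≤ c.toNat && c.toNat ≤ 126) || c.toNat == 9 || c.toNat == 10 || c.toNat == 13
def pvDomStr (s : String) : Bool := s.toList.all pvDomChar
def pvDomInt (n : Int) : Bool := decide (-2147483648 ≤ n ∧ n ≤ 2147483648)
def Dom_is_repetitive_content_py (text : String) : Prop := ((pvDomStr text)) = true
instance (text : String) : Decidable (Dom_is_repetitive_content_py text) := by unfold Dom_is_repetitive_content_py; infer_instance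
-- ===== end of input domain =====

-- B replaces A's hash-map word counter by sort-then-scan (longest run of equal words in the
-- sorted list = maximum word frequency); same return value, no speed claim.
-- In both ports the Python float comparison `max_count / len(words) > 0.3` is rendered as the
-- integer comparison `3 * len(words) < 10 * max_count`, which agrees with CPython's double
-- arithmetic whenever len(words) < 10^15.

-- ===== PORT A =====
def is_repetitive_content_py (text : String) : Bool :=
  let words := PySem.Str.split₀ (PySem.Str.lower text)
  if words.length < 5 then false
  else
    let word_counts := words.foldl (fun d w => d.insert w (d.getD w 0 + 1))
      (PySem.Dict.empty (κ := String) (ν := Int))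
    match PySem.List.max? word_counts.values (fun v => v) with
    | none => false  -- unreachable: words is nonempty in this branch
    | some m => decide ((3 : Int) * words.length < 10 * m)

-- ===== PORT B =====
def is_repetitive_content_py_alt (text : String) : Bool :=
  let words := PySem.Str.split₀ (PySem.Str.lower text)
  if words.length < 5 then false
  else
    let st := (PySem.List.sorted words (fun w => w) false).foldl
      (fun (st : Option String × Int × Int) w =>
        let pr := if some w = st.1 then (st.2.1 + 1, st.1) else ((1 : Int), some w)
        (pr.2, pr.1, if pr.1 > st.2.2 then pr.1 else st.2.2))
      (none, 0, 0)
    decide ((3 : Int) * words.length < 10 * st.2.2)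

-- ===== PRECONDITION & SPEC =====
def Spec_is_repetitive_content_py (text : String) (out : Bool) : Prop := out = is_repetitive_content_py_alt text
instance (text : String) (out : Bool) : Decidable (Spec_is_repetitive_content_py text out) := by unfold Spec_is_repetitive_content_py; infer_instance

-- ===== CLAIM (what is proved, stated in full; the proofs are below) =====
def Claim_equal_is_repetitive_content_py : Prop := ∀ (text : String), Dom_is_repetitive_content_py text → Spec_is_repetitive_content_py text (is_repetitive_content_py text)

-- ===== LEMMAS AND PROOFS =====

-- B's loop body, named for the proofs (definitionally the lambda in the port).
def pvF (st : Option String × Int × Int) (w : String) : Option String × Int × Int :=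
  let pr := if some w = st.1 then (st.2.1 + 1, st.1) else ((1 : Int), some w)
  (pr.2, pr.1, if pr.1 > st.2.2 then pr.1 else st.2.2)

-- the longest-run value of B's scan, as a recursion
def pvRunMax : String → Int → List String → Int
  | _, r, [] => r
  | p, r, w :: t => if w = p then pvRunMax p (r + 1) t else max r (pvRunMax w 1 t)

theorem pvRunMax_ge (t : List String) : ∀ p r, r ≤ pvRunMax p r t := by
  induction t with
  | nil => intro p r; simp [pvRunMax]
  | cons w t ih =>
    intro p r
    by_cases h : w = p
    · simpa [pvRunMax, h] using le_trans (by omega) (ih p (r + 1))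
    · simp [pvRunMax, h]

theorem pvFold_eq (t : List String) : ∀ p r m, r ≤ m →
    (t.foldl pvF (some p, r, m)).2.2 = max m (pvRunMax p r t) := by
  induction t with
  | nil => intro p r m h; simp [pvRunMax]; omega
  | cons w t ih =>
    intro p r m h
    by_cases hw : w = p
    · subst hw
      have h1 : r + 1 ≤ pvRunMax w (r + 1) t := pvRunMax_ge t w (r + 1)
      have : (pvF (some w, r, m) w) = (some w, r + 1, if r + 1 > m then r + 1 else m) := by
        simp [pvF]
      rw [List.foldl_cons, this, ih w (r + 1) _ (by omega)]
      simp [pvRunMax]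
      omega
    · have h1 : (1 : Int) ≤ pvRunMax w 1 t := pvRunMax_ge t w 1
      have : (pvF (some p, r, m) w) = (some w, 1, if 1 > m then 1 else m) := by
        simp [pvF, hw]
      rw [List.foldl_cons, this, ih w 1 _ (by omega)]
      simp [pvRunMax, hw]
      omega

theorem pvFoldlMaxInit (l : List Int) : ∀ a b, l.foldl max (max a b) = max a (l.foldl max b) := by
  induction l with
  | nil => intro a b; simp
  | cons x l ih =>
    intro a b
    have : max (max a b) x = max a (max b x) := by omega
    simp only [List.foldl_cons, this, ih a (max b x)]

theorem pvFoldlMaxAbsorb (l : List Int) : ∀ s a, a ∈ l → l.foldl max (max s a) = l.foldl max s := by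
  induction l with
  | nil => intro s a h; simp at h
  | cons x l ih =>
    intro s a h
    rcases List.mem_cons.mp h with h | h
    · subst h
      have : max (max s a) a = max s a := by omega
      simp only [List.foldl_cons, this]
    · have : max (max s a) x = max (max s x) a := by omega
      simp only [List.foldl_cons, this, ih (max s x) a h]

theorem pvRunSpec (t : List String) : ∀ w r, (w :: t).Pairwise (· ≤ ·) →
    pvRunMax w r t =
      (t.map (fun u => if u = w then r + (t.count w : Int) else (t.count u : Int))).foldl max r := by
  induction t with
  | nil => intro w r _; simp [pvRunMax]
  | cons v t ih =>
    intro w r hp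
    have hp' : (v :: t).Pairwise (· ≤ ·) := hp.tail
    have hwv : w ≤ v := (List.pairwise_cons.mp hp).1 v (by simp)
    by_cases hvw : v = w
    · subst hvw
      have ihw := ih v (r + 1) hp'
      rw [pvRunMax, if_pos rfl, ihw]
      have hmap : t.map (fun u => if u = v then (r + 1) + (t.count v : Int) else (t.count u : Int))
          = t.map (fun u => if u = v then r + (((v :: t).count v : Int)) else (((v :: t).count u : Int))) := by
        apply List.map_congr_left
        intro u hu
        by_cases huv : u = v
        · subst huv; simp [List.count_cons_self]; ring
        · have hvu : v ≠ u := fun e => huv e.symm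
          simp [huv, hvu]
      rw [hmap]
      have hhead : (if v = v then r + (((v :: t).count v : Int)) else (((v :: t).count v : Int)))
          = r + 1 + (t.count v : Int) := by simp [List.count_cons_self]; ring
      rw [List.map_cons, List.foldl_cons, hhead]
      by_cases hvt : v ∈ t
      · have hmem : r + 1 + (t.count v : Int) ∈
            t.map (fun u => if u = v then r + (((v :: t).count v : Int)) else (((v :: t).count u : Int))) := by
          refine List.mem_map.mpr ⟨v, hvt, ?_⟩
          simp [List.count_cons_self]; ring
        have h1 : max r (r + 1 + (t.count v : Int)) = max (r + 1) (r + 1 + (t.count v : Int)) := by omega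
        rw [h1, pvFoldlMaxAbsorb _ (r + 1) _ hmem]
      · have hc : t.count v = 0 := List.count_eq_zero.mpr hvt
        have h2 : max r (r + 1 + (t.count v : Int)) = r + 1 := by rw [hc]; push_cast; omega
        rw [h2]
    · -- v ≠ w: every element from v on is > w
      have hvt : ∀ x ∈ v :: t, w < x := by
        intro x hx
        have hle : w ≤ x := (List.pairwise_cons.mp hp).1 x hx
        rcases List.mem_cons.mp hx with h | h
        · subst h; exact lt_of_le_of_ne hwv (fun e => hvw e.symm)
        · have hvx : v ≤ x := (List.pairwise_cons.mp hp').1 x h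
          exact lt_of_le_of_ne hle (by rintro rfl; exact hvw (le_antisymm hvx hwv))
      have ihv := ih v 1 hp'
      rw [pvRunMax, if_neg hvw, ihv]
      have hmap : t.map (fun u => if u = v then (1 : Int) + (t.count v : Int) else (t.count u : Int))
          = t.map (fun u => if u = w then r + (((v :: t).count w : Int)) else (((v :: t).count u : Int))) := by
        apply List.map_congr_left
        intro u hu
        have huw : u ≠ w := ne_of_gt (hvt u (by simp [hu]))
        by_cases huv : u = v
        · subst huv; simp [huw, List.count_cons_self]; ring
        · have hvu : v ≠ u := fun e => huv e.symm
          simp [huw, huv, hvu]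
      rw [hmap]
      have hhead : (if v = w then r + (((v :: t).count w : Int)) else (((v :: t).count v : Int)))
          = 1 + (t.count v : Int) := by simp [hvw, List.count_cons_self]; ring
      rw [List.map_cons, List.foldl_cons, hhead]
      set L := t.map (fun u => if u = w then r + (((v :: t).count w : Int)) else (((v :: t).count u : Int))) with hL
      have hinit : L.foldl max (max r (1 + (t.count v : Int))) = max r (L.foldl max (1 + (t.count v : Int))) :=
        pvFoldlMaxInit L r (1 + (t.count v : Int))
      rw [hinit]
      by_cases hvt' : v ∈ t
      · have hmem : 1 + (t.count v : Int) ∈ L := by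
          rw [hL]
          refine List.mem_map.mpr ⟨v, hvt', ?_⟩
          simp [hvw, List.count_cons_self]; ring
        have habs : L.foldl max (max 1 (1 + (t.count v : Int))) = L.foldl max 1 :=
          pvFoldlMaxAbsorb L 1 _ hmem
        have h1 : max (1 : Int) (1 + (t.count v : Int)) = 1 + (t.count v : Int) := by
          have h0 : (0 : Int) ≤ (t.count v : Int) := by positivity
          omega
        rw [h1] at habs
        rw [habs]
      · have hc : t.count v = 0 := List.count_eq_zero.mpr hvt'
        rw [hc]
        norm_num

-- B's whole loop, as "max run" facts about counts in the sorted list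
theorem pvB_bounds (ws : List String) (hne : ws ≠ []) :
    ∃ m : Int, (((PySem.List.sorted ws (fun w => w) false).foldl pvF (none, 0, 0)).2.2 = m) ∧
      (∃ u ∈ ws, m = (ws.count u : Int)) ∧ (∀ u ∈ ws, (ws.count u : Int) ≤ m) := by
  have hperm : (PySem.List.sorted ws (fun w => w) false).Perm ws := PySem.List.sorted_perm ws _ _
  have hpair : (PySem.List.sorted ws (fun w => w) false).Pairwise (· ≤ ·) := by
    simpa using PySem.List.sorted_pairwise ws (fun w => w)
  obtain ⟨w, t, hS⟩ : ∃ w t, PySem.List.sorted ws (fun w => w) false = w :: t := by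
    cases h : PySem.List.sorted ws (fun w => w) false with
    | nil => exact absurd ((PySem.List.sorted_eq_nil_iff ws _ _).mp h) hne
    | cons a l => exact ⟨a, l, rfl⟩
  rw [hS] at hperm hpair
  -- counts agree between ws and the sorted list
  have hcnt : ∀ u, (w :: t).count u = ws.count u := fun u => hperm.count_eq u
  have hmem : ∀ u, u ∈ w :: t ↔ u ∈ ws := fun u => hperm.mem_iff
  -- run the first step of the fold, then the rest via pvFold_eq
  have hstep : pvF (none, 0, 0) w = (some w, 1, 1) := by simp [pvF]
  have hfold : ((w :: t).foldl pvF (none, 0, 0)).2.2 = max 1 (pvRunMax w 1 t) := by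
    rw [List.foldl_cons, hstep]; exact pvFold_eq t w 1 1 le_rfl
  have hge : (1 : Int) ≤ pvRunMax w 1 t := pvRunMax_ge t w 1
  have hfold' : ((w :: t).foldl pvF (none, 0, 0)).2.2 = pvRunMax w 1 t := by
    rw [hfold]; omega
  -- the run-max equals the fold of the count list
  have hspec := pvRunSpec t w 1 hpair
  have hfun : (fun u => if u = w then (1 : Int) + (t.count w : Int) else (t.count u : Int))
      = fun u => ((w :: t).count u : Int) := by
    funext u
    by_cases huw : u = w
    · subst huw; simp [List.count_cons_self]; ring
    · have hwu : w ≠ u := fun e => huw e.symm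
      simp [huw, hwu]
  rw [hfun] at hspec
  refine ⟨pvRunMax w 1 t, by rw [hS, hfold'], ?_, ?_⟩
  · -- attained
    rcases PySem.List.foldl_max_mem (t.map fun u => ((w :: t).count u : Int)) 1 with h1 | h1
    · refine ⟨w, (hmem w).mp (by simp), ?_⟩
      have hub : ((w :: t).count w : Int) ≤ pvRunMax w 1 t := by
        by_cases hwt : w ∈ t
        · rw [hspec]
          exact (PySem.List.le_foldl_max _ 1).2 _ (List.mem_map.mpr ⟨w, hwt, rfl⟩)
        · have : (w :: t).count w = 1 := by
            simp [List.count_cons_self, List.count_eq_zero.mpr hwt]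
          rw [this, hspec]; exact (PySem.List.le_foldl_max _ 1).1
      have hlb : (1 : Int) ≤ ((w :: t).count w : Int) := by
        have hpos : 0 < (w :: t).count w := List.count_pos_iff.mpr (by simp)
        exact_mod_cast hpos
      rw [← hcnt w]
      omega
    · rcases List.mem_map.mp (hspec ▸ h1) with ⟨u, hu, he⟩
      exact ⟨u, (hmem u).mp (by simp [hu]), by rw [← hcnt u, ← he]⟩
  · -- upper bound
    intro u hu
    rw [← hcnt u, hspec]
    rcases List.mem_cons.mp ((hmem u).mpr hu) with h | h
    · subst h
      by_cases hwt : u ∈ t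
      · exact (PySem.List.le_foldl_max _ 1).2 _ (List.mem_map.mpr ⟨u, hwt, rfl⟩)
      · have : (u :: t).count u = 1 := by
          simp [List.count_cons_self, List.count_eq_zero.mpr hwt]
        rw [this]; exact (PySem.List.le_foldl_max _ 1).1
    · exact (PySem.List.le_foldl_max _ 1).2 _ (List.mem_map.mpr ⟨u, h, rfl⟩)

-- B's loop body written out (the form left in the goal after zeta reduction)
theorem pvF_expand : (fun (st : Option String × Int × Int) (w : String) =>
    ((if some w = st.1 then (st.2.1 + 1, st.1) else ((1 : Int), some w)).2,
     (if some w = st.1 then (st.2.1 + 1, st.1) else ((1 : Int), some w)).1,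
     if (if some w = st.1 then (st.2.1 + 1, st.1) else ((1 : Int), some w)).1 > st.2.2 then
       (if some w = st.1 then (st.2.1 + 1, st.1) else ((1 : Int), some w)).1
     else st.2.2)) = pvF := rfl

-- A's dictionary values are exactly the counts of the distinct words
theorem pvA_values (ws : List String) :
    (ws.foldl (fun d w => d.insert w (d.getD w 0 + 1))
        (PySem.Dict.empty (κ := String) (ν := Int))).values
      = (PySem.Set.ofList ws).map (fun k => (ws.count k : Int)) := by
  rw [PySem.Dict.foldl_insert_getD_add_one_eq_counter]
  show (PySem.Dict.counter ws).items.map Prod.snd = _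
  rw [PySem.Dict.items_counter]
  simp [List.map_map, Function.comp]

-- ===== VERDICT (by name: the statement is the Claim_ definition above) =====
set_option maxHeartbeats 1000000 in
theorem is_repetitive_content_py_spec : Claim_equal_is_repetitive_content_py := by
  unfold Claim_equal_is_repetitive_content_py Spec_is_repetitive_content_py
  intro text _
  unfold is_repetitive_content_py is_repetitive_content_py_alt
  set ws := PySem.Str.split₀ (PySem.Str.lower text) with hws
  by_cases h5 : ws.length < 5
  · simp [h5]
  · simp only [h5, if_false]
    have hne : ws ≠ [] := by
      intro h; rw [h] at h5; simp at h5
    obtain ⟨m, hB, ⟨u0, hu0, he0⟩, hub⟩ := pvB_bounds ws hne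
    rw [pvA_values ws]
    have hVne : ∃ v0, v0 ∈ (PySem.Set.ofList ws).map (fun k => (ws.count k : Int)) := by
      obtain ⟨x, hx⟩ := List.exists_mem_of_ne_nil ws hne
      exact ⟨_, List.mem_map.mpr ⟨x, (PySem.Set.mem_ofList ws x).mpr hx, rfl⟩⟩
    obtain ⟨mA, hmA⟩ : ∃ mA, PySem.List.max? ((PySem.Set.ofList ws).map (fun k => (ws.count k : Int))) (fun v => v) = some mA := by
      have hnn : PySem.List.max? ((PySem.Set.ofList ws).map (fun k => (ws.count k : Int))) (fun v => v) ≠ none := by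
        intro h
        rw [PySem.List.max?_eq_none_iff] at h
        obtain ⟨v0, hv0⟩ := hVne
        rw [h] at hv0; simp at hv0
      exact Option.ne_none_iff_exists'.mp hnn
    rw [hmA]
    have hAB : mA = m := by
      have hAmem := PySem.List.max?_mem hmA
      have hAmax := PySem.List.max?_isMax hmA
      rcases List.mem_map.mp hAmem with ⟨uA, huA, heA⟩
      have huA' : uA ∈ ws := (PySem.Set.mem_ofList ws uA).mp huA
      apply le_antisymm
      · rw [← heA]; exact hub uA huA'
      · rw [he0]
        exact hAmax _ (List.mem_map.mpr ⟨u0, (PySem.Set.mem_ofList ws u0).mpr hu0, rfl⟩)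
    rw [pvF_expand, hB, ← hAB]
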